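-- pv_equiv track=rewrite | github.com/alexagomez/soccer-database-project | players/views.py | get_fields_and_params
-- ===== SOURCE A (Python) =====
-- primary_key = 'long_name'
--
-- table_columns = ['long_name', 'age', 'dob', 'height_cm', 'weight_kg', 'nationality', 'passing', 'defending', 'shooting',
--                  'dribbling', 'pace', 'overall', 'team_jersey_number', 'preferred_foot', 'wage_eur']
--
-- alt_tables = {
--     'player_positions': {
--         'primary_key': 'long_name',
--         'table_columns': ['long_name', 'position']
--     },
--     'plays_or_coaches_for': {
--         'primary_key': 'long_name',
--         'table_columns': ['long_name', 'club_team', 'national_team']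
--     }
-- }
--
-- def get_fields_and_params(request_dict):
--     field_to_param = {}
--
--     for field in table_columns:
--         param = request_dict.get(field)
--         if param is not None:
--             field_to_param[field + " = %s"] = param
--
--     for table_info in alt_tables.values():
--         for field in table_info['table_columns']:
--             if field != primary_key:
--                 param = request_dict.get(field)
--                 if param is not None:
--                     field_to_param[field + " = %s"] = param
--
--     return field_to_param
-- ===== SOURCE B (Python) =====
-- primary_key = 'long_name'
--
-- table_columns = ['long_name', 'age', 'dob', 'height_cm', 'weight_kg', 'nationality', 'passing', 'defending', 'shooting',
--                  'dribbling', 'pace', 'overall', 'team_jersey_number', 'preferred_foot', 'wage_eur']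
--
-- alt_tables = {
--     'player_positions': {
--         'primary_key': 'long_name',
--         'table_columns': ['long_name', 'position']
--     },
--     'plays_or_coaches_for': {
--         'primary_key': 'long_name',
--         'table_columns': ['long_name', 'club_team', 'national_team']
--     }
-- }
--
-- # Rank of every updatable column, built once: position in (base columns, then each
-- # alt table's non-primary-key columns).  Membership in _RANK = "is an updatable column".
-- _RANK = {f: i for i, f in enumerate(
--     table_columns + [c for info in alt_tables.values()
--                      for c in info['table_columns'] if c != primary_key])}
--
--
-- def get_fields_and_params(request_dict):
--     # Invert the traversal: scan the request once, keep the allowed (field, value)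
--     # pairs, then sort them into canonical column order by their precomputed rank.
--     hits = [(k, v) for k, v in request_dict.items() if k in _RANK and v is not None]
--     hits.sort(key=lambda kv: _RANK[kv[0]])
--     return {k + " = %s": v for k, v in hits}
-- ===== Notes on version B (the rewrite author's own statement) =====
-- stated objective: alternative
-- what changed: Inverts the traversal: instead of scanning the fixed column lists and doing a dict lookup per column, B precomputes a column->rank map once, scans the request items once keeping the allowed pairs, and sorts them by rank into canonical column order.
import Mathlib
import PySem

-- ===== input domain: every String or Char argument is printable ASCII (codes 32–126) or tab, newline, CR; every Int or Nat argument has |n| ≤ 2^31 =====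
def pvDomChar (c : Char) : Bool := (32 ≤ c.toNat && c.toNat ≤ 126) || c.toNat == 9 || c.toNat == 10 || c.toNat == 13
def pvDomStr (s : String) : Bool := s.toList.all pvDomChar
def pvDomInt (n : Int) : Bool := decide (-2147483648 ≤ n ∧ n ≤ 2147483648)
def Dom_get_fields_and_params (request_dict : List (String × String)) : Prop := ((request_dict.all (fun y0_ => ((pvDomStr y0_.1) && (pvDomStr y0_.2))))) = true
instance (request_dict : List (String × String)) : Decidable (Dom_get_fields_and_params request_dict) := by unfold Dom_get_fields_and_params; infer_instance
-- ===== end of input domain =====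

-- B inverts the traversal: a precomputed column→rank map, one scan over the request
-- items keeping the allowed pairs, then a sort by rank; same return value, no speed claim.

-- request_dict.get(k): first match in the association list (Python dict lookup)
def pvLookup (rd : List (String × String)) (k : String) : Option String :=
  (rd.find? (fun p => p.1 == k)).map (·.2)

-- request_dict.items() under the association-list model of a Python dict (lookup =
-- first match): the distinct keys in first-occurrence order, each with its first value
def pvDictItems (l : List (String × String)) : List (String × String) :=
  (PySem.Set.ofList (l.map (·.1))).filterMap (fun k => (pvLookup l k).map (fun v => (k, v)))

-- ===== PORT A =====
def primaryKey : String := "long_name"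

def tableColumns : List String :=
  ["long_name", "age", "dob", "height_cm", "weight_kg", "nationality", "passing",
   "defending", "shooting", "dribbling", "pace", "overall", "team_jersey_number",
   "preferred_foot", "wage_eur"]

-- alt_tables: name ↦ (primary_key, table_columns)
def altTables : List (String × (String × List String)) :=
  [("player_positions", ("long_name", ["long_name", "position"])),
   ("plays_or_coaches_for", ("long_name", ["long_name", "club_team", "national_team"]))]

def get_fields_and_params (request_dict : List (String × String)) : List (String × String) :=
  let d1 : PySem.Dict String String :=
    tableColumns.foldl (fun acc field =>
      match pvLookup request_dict field with
      | some param => acc.insert (field ++ " = %s") param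
      | none => acc) PySem.Dict.empty
  let d2 : PySem.Dict String String :=
    altTables.foldl (fun acc tableInfo =>
      tableInfo.2.2.foldl (fun acc field =>
        if field ≠ primaryKey then
          match pvLookup request_dict field with
          | some param => acc.insert (field ++ " = %s") param
          | none => acc
        else acc) acc) d1
  d2.items

-- ===== PORT B =====
-- _RANK: column ↦ its position in (base columns, then each alt table's non-primary-key columns)
def rankFields : List String :=
  tableColumns ++ altTables.flatMap (fun info => info.2.2.filter (fun c => c ≠ primaryKey))

def rankDict : PySem.Dict String Int :=
  (PySem.List.enumerate rankFields).foldl (fun d p => d.insert p.2 p.1) PySem.Dict.empty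

def get_fields_and_params_alt (request_dict : List (String × String)) : List (String × String) :=
  let hits := (pvDictItems request_dict).filter (fun kv => rankDict.contains kv.1)
  let sortedHits := PySem.List.sorted hits (key := fun kv => rankDict.getD kv.1 0)
  sortedHits.map (fun kv => (kv.1 ++ " = %s", kv.2))

-- ===== PRECONDITION & SPEC =====
def Spec_get_fields_and_params (request_dict : List (String × String)) (out : List (String × String)) : Prop := out = get_fields_and_params_alt request_dict
instance (request_dict : List (String × String)) (out : List (String × String)) : Decidable (Spec_get_fields_and_params request_dict out) := by unfold Spec_get_fields_and_params; infer_instance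

-- ===== CLAIM (what is proved, stated in full; the proofs are below) =====
def Claim_equal_get_fields_and_params : Prop := ∀ (request_dict : List (String × String)), Dom_get_fields_and_params request_dict → Spec_get_fields_and_params request_dict (get_fields_and_params request_dict)

-- ===== LEMMAS AND PROOFS =====

-- A fold of conditional inserts at fresh, pairwise-distinct keys appends exactly the
-- filterMap of the successful lookups to the dict's item list.
lemma foldl_condInsert (rd : List (String × String)) :
    ∀ (fs : List String) (d : PySem.Dict String String),
      (∀ f ∈ fs, d.contains (f ++ " = %s") = false) →
      (fs.map (fun f => f ++ " = %s")).Nodup →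
      (fs.foldl (fun acc f =>
          match pvLookup rd f with
          | some param => acc.insert (f ++ " = %s") param
          | none => acc) d).items
        = d.items ++ fs.filterMap (fun f => (pvLookup rd f).map (fun v => (f ++ " = %s", v))) := by
  intro fs
  induction fs with
  | nil => intro d _ _; simp
  | cons f rest ih =>
    intro d hfresh hnodup
    simp only [List.map_cons, List.nodup_cons, List.mem_map] at hnodup
    simp only [List.foldl_cons, List.filterMap_cons]
    cases hlk : pvLookup rd f with
    | none =>
      simp only [Option.map_none]
      exact ih d (fun g hg => hfresh g (List.mem_cons_of_mem _ hg)) hnodup.2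
    | some param =>
      simp only [Option.map_some]
      rw [ih (d.insert (f ++ " = %s") param) ?_ hnodup.2]
      · rw [PySem.Dict.items_insert_of_not_contains d param
            (hfresh f List.mem_cons_self)]
        simp
      · intro g hg
        rw [PySem.Dict.contains_insert]
        have hne : ¬ (g ++ " = %s" == f ++ " = %s") = true := by
          simp only [beq_iff_eq]
          intro h
          exact hnodup.1 ⟨g, hg, h⟩
        simp only [Bool.or_eq_false_iff]
        exact ⟨by simpa using hne, hfresh g (List.mem_cons_of_mem _ hg)⟩

-- items() membership is exactly "the first match of this key is this value"
lemma mem_pvDictItems (rd : List (String × String)) (p : String × String) :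
    p ∈ pvDictItems rd ↔ pvLookup rd p.1 = some p.2 := by
  simp only [pvDictItems, List.mem_filterMap, Option.map_eq_some_iff, PySem.Set.mem_ofList]
  constructor
  · rintro ⟨k, hk, v, hv, rfl⟩; exact hv
  · intro hv
    rcases Option.map_eq_some_iff.1 hv with ⟨r, hr, hv2⟩
    have hrk : r.1 = p.1 := by simpa using List.find?_some hr
    exact ⟨p.1, List.mem_map.2 ⟨r, List.mem_of_find?_eq_some hr, hrk⟩, p.2, hv, rfl⟩

-- items() keys are pairwise distinct
lemma pairwise_keys_pvDictItems (rd : List (String × String)) :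
    (pvDictItems rd).Pairwise (fun a b => a.1 ≠ b.1) := by
  have h : (PySem.Set.ofList (rd.map (fun p : String × String => p.1))).Pairwise
      (fun a b => a ≠ b) := by
    have := PySem.Set.nodup_ofList (rd.map (fun p : String × String => p.1))
    simpa [List.Nodup] using this
  refine List.Pairwise.filterMap _ ?_ h
  intro a b hab x hx y hy
  rcases Option.map_eq_some_iff.1 hx with ⟨v, _, rfl⟩
  rcases Option.map_eq_some_iff.1 hy with ⟨w, _, rfl⟩
  exact hab

-- the canonical (field, value) list A produces, before the " = %s" suffix
def canonHits (rd : List (String × String)) : List (String × String) :=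
  rankFields.filterMap (fun f => (pvLookup rd f).map (fun v => (f, v)))

lemma mem_canonHits (rd : List (String × String)) (p : String × String) :
    p ∈ canonHits rd ↔ p.1 ∈ rankFields ∧ pvLookup rd p.1 = some p.2 := by
  simp only [canonHits, List.mem_filterMap, Option.map_eq_some_iff]
  constructor
  · rintro ⟨f, hf, v, hv, rfl⟩; exact ⟨hf, hv⟩
  · rintro ⟨hf, hv⟩; exact ⟨p.1, hf, p.2, hv, rfl⟩

-- rankDict's keys are exactly the columns, and ranks increase along rankFields
lemma rankDict_keys : rankDict.keys = rankFields := by decide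

lemma rankFields_rank_pairwise :
    rankFields.Pairwise (fun f g => rankDict.getD f 0 < rankDict.getD g 0) := by decide

lemma canonHits_pairwise (rd : List (String × String)) :
    (canonHits rd).Pairwise (fun a b => rankDict.getD a.1 0 < rankDict.getD b.1 0) := by
  refine List.Pairwise.filterMap _ ?_ rankFields_rank_pairwise
  intro f g hfg x hx y hy
  rcases Option.map_eq_some_iff.1 hx with ⟨v, _, rfl⟩
  rcases Option.map_eq_some_iff.1 hy with ⟨w, _, rfl⟩
  exact hfg

lemma canonHits_nodup (rd : List (String × String)) : (canonHits rd).Nodup :=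
  (canonHits_pairwise rd).imp (fun h => by rintro rfl; exact lt_irrefl _ h)

-- B's hit list is a permutation of the canonical one
lemma perm_hits (rd : List (String × String)) :
    (canonHits rd).Perm ((pvDictItems rd).filter (fun kv => rankDict.contains kv.1)) := by
  have hnd2 : ((pvDictItems rd).filter (fun kv => rankDict.contains kv.1)).Nodup :=
    ((pairwise_keys_pvDictItems rd).filter _).imp (fun h => by rintro rfl; exact h rfl)
  refine List.perm_of_nodup_nodup_toFinset_eq (canonHits_nodup rd) hnd2 ?_
  ext p
  simp only [List.mem_toFinset, List.mem_filter, mem_canonHits, mem_pvDictItems]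
  rw [PySem.Dict.contains_eq_decide_mem_keys, rankDict_keys]
  constructor
  · rintro ⟨hf, hv⟩; exact ⟨hv, by simpa using hf⟩
  · rintro ⟨hv, hf⟩; exact ⟨by simpa using hf, hv⟩

-- ===== VERDICT (by name: the statement is the Claim_ definition above) =====
theorem get_fields_and_params_spec : Claim_equal_get_fields_and_params := by
  intro rd _
  unfold Spec_get_fields_and_params get_fields_and_params get_fields_and_params_alt
  -- A: its two literal loop phases are the conditional-insert fold over the flattened list
  show (rankFields.foldl (fun acc f =>
          match pvLookup rd f with
          | some param => acc.insert (f ++ " = %s") param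
          | none => acc) PySem.Dict.empty).items
      = (PySem.List.sorted ((pvDictItems rd).filter (fun kv => rankDict.contains kv.1))
          (key := fun kv => rankDict.getD kv.1 0)).map (fun kv => (kv.1 ++ " = %s", kv.2))
  rw [foldl_condInsert rd rankFields PySem.Dict.empty
        (fun f _ => PySem.Dict.contains_empty _)
        (by decide)]
  -- B: the sorted hit list is the canonical one
  have hs : PySem.List.sorted ((pvDictItems rd).filter (fun kv => rankDict.contains kv.1))
      (key := fun kv => rankDict.getD kv.1 0) = canonHits rd :=
    PySem.List.sorted_eq_of_perm_of_pairwise_lt _ _ _ (perm_hits rd) (canonHits_pairwise rd)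
  rw [hs]
  simp [canonHits, List.map_filterMap, Option.map_map, Function.comp_def, PySem.Dict.empty]
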